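-- pv_equiv track=rewrite | github.com/jtaylordev/mini-projects | maze_solver/src/main.py | dfs
-- ===== SOURCE A (Python) =====
-- def dfs(graph, start, goal, path=None, visited=None):
--     if path is None:
--         path = [start]
--     if visited is None:
--         visited = set()
--     visited.add(start)
--
--     if start == goal:
--         return path
--
--     for neighbor in graph.get(start, []):
--         if neighbor not in visited:
--             result = dfs(graph, neighbor, goal, path + [neighbor], visited)
--             if result is not None:
--                 return result
--     return None
-- ===== SOURCE B (Python) =====
-- def dfs(graph, start, goal, path=None, visited=None):
--     if path is None:
--         path = [start]
--     if visited is None: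
--         visited = set()
--     visited.add(start)
--     if start == goal:
--         return path
--
--     stack = [(iter(graph.get(start, [])), path)]
--     while stack:
--         it, p = stack[-1]
--         nxt = next(it, None)
--         if nxt is None:
--             stack.pop()
--         elif nxt not in visited:
--             visited.add(nxt)
--             if nxt == goal:
--                 return p + [nxt]
--             stack.append((iter(graph.get(nxt, [])), p + [nxt]))
--     return None
-- ===== Notes on version B (the rewrite author's own statement) =====
-- stated objective: alternative
-- what changed: Replaces the recursive DFS by an iterative DFS over an explicit stack of (neighbor-iterator, path) frames, so there is no Python recursion and no per-call return-value plumbing.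
import Mathlib
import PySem

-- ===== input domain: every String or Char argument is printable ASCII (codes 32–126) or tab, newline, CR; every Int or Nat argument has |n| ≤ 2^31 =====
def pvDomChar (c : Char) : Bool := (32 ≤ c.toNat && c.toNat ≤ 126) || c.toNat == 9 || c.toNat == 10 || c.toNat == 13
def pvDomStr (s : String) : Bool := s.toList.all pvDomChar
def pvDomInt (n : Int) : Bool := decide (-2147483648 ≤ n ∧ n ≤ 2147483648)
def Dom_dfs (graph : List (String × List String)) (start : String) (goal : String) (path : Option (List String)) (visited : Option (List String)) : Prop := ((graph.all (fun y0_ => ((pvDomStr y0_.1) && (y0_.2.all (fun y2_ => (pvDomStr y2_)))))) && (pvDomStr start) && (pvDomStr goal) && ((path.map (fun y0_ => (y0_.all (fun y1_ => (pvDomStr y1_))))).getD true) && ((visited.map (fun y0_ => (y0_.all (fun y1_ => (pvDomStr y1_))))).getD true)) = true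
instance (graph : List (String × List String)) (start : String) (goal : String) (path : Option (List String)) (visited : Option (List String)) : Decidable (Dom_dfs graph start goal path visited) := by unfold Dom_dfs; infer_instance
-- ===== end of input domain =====

-- B replaces the recursive DFS by an iterative DFS over an explicit stack of (remaining-neighbors, path) frames; return values agree.
-- NOTE on side effects: the Python A mutates the caller-supplied 'visited' set (and B does the same); the equivalence proved here is about the RETURN value only.

-- ===== PORT A =====
-- graph.get(s, []) under the assoc-list dict convention (first match), shared by both ports
def pvGet (graph : List (String × List String)) (s : String) : List String :=
  match graph with
  | [] => []
  | (k, vs) :: rest => if k = s then vs else pvGet rest s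

-- termination devices (not part of the Python computation): the universe of all
-- neighbor strings, a measure counting unvisited universe elements, and lemmas
def pvU (graph : List (String × List String)) : List String :=
  graph.flatMap (fun p => p.2)

lemma pvGet_subset_pvU (graph : List (String × List String)) (s : String) :
    ∀ x ∈ pvGet graph s, x ∈ pvU graph := by
  induction graph with
  | nil => intro x hx; simp [pvGet] at hx
  | cons hd tl ih =>
    intro x hx
    simp only [pvGet] at hx
    simp only [pvU, List.flatMap_cons, List.mem_append]
    by_cases h : hd.1 = s
    · rw [if_pos h] at hx; exact Or.inl hx
    · rw [if_neg h] at hx; exact Or.inr (ih x hx)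

def pvMeas (graph : List (String × List String)) (v : PySem.Set String) : Nat :=
  ((pvU graph).filter (fun s => !(PySem.Set.contains v s))).length

lemma pvMeas_le_of_subset (graph : List (String × List String))
    {v w : PySem.Set String} (h : ∀ x ∈ v, x ∈ w) :
    pvMeas graph w ≤ pvMeas graph v := by
  unfold pvMeas
  apply List.Sublist.length_le
  apply List.monotone_filter_right
  intro x hx
  simp only [Bool.not_eq_eq_eq_not, Bool.not_true, PySem.Set.contains_eq_listContains] at hx ⊢
  have : x ∉ w := by simpa using hx
  have : x ∉ v := fun hm => this (h x hm)
  simpa using this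

lemma pvMeas_add_lt (graph : List (String × List String))
    {v : PySem.Set String} {n : String}
    (hU : n ∈ pvU graph) (hn : ¬ (PySem.Set.contains v n = true)) :
    pvMeas graph (PySem.Set.add v n) < pvMeas graph v := by
  have hsub : ((pvU graph).filter (fun s => !(PySem.Set.contains (PySem.Set.add v n) s))).Sublist
      ((pvU graph).filter (fun s => !(PySem.Set.contains v s))) := by
    apply List.monotone_filter_right
    intro x hx
    simp only [Bool.not_eq_eq_eq_not, Bool.not_true, PySem.Set.contains_eq_listContains] at hx ⊢
    have hx' : x ∉ PySem.Set.add v n := by simpa using hx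
    have : x ∉ v := fun hm => hx' ((PySem.Set.mem_add v n x).2 (Or.inl hm))
    simpa using this
  apply Nat.lt_of_le_of_ne (List.Sublist.length_le hsub)
  intro hlen
  have heq := hsub.eq_of_length hlen
  have hnmem : n ∈ (pvU graph).filter (fun s => !(PySem.Set.contains v s)) := by
    simp only [List.mem_filter, Bool.not_eq_eq_eq_not, Bool.not_true]
    exact ⟨hU, by simpa using hn⟩
  rw [← heq] at hnmem
  simp only [List.mem_filter, Bool.not_eq_eq_eq_not, Bool.not_true] at hnmem
  have hmem2 : n ∈ PySem.Set.add v n := (PySem.Set.mem_add v n n).2 (Or.inr rfl)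
  have := hnmem.2
  simp only [PySem.Set.contains_eq_listContains] at this
  exact absurd hmem2 (by simpa using this)

-- port of Python A: 'dfs' recursion + its 'for neighbor' loop, mutually recursive;
-- the returned set (with a subset proof, a termination device) models the mutated 'visited'
mutual
def dfsA (graph : List (String × List String)) (goal : String) (start : String)
    (path : List String) (v : PySem.Set String) :
    Option (List String) × {w : PySem.Set String // ∀ x ∈ PySem.Set.add v start, x ∈ w} :=
  let v' := PySem.Set.add v start
  if start = goal then (some path, ⟨v', fun _ hx => hx⟩)
  else
    let r := loopA graph goal (pvGet graph start) path v' (pvGet_subset_pvU graph start)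
    (r.1, ⟨r.2.1, r.2.2⟩)
termination_by (pvMeas graph (PySem.Set.add v start), 1, 0)
decreasing_by
  apply Prod.Lex.right
  exact Prod.Lex.left _ _ (Nat.zero_lt_one)

def loopA (graph : List (String × List String)) (goal : String) (ns : List String)
    (path : List String) (v : PySem.Set String)
    (h : ∀ x ∈ ns, x ∈ pvU graph) :
    Option (List String) × {w : PySem.Set String // ∀ x ∈ v, x ∈ w} :=
  match ns with
  | [] => (none, ⟨v, fun _ hx => hx⟩)
  | n :: ns' =>
    if hn : PySem.Set.contains v n then
      loopA graph goal ns' path v (fun x hx => h x (List.mem_cons_of_mem _ hx))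
    else
      match dfsA graph goal n (path ++ [n]) v with
      | (some r, w) => (some r, ⟨w.1, fun x hx => w.2 x ((PySem.Set.mem_add v n x).2 (Or.inl hx))⟩)
      | (none, w) =>
        let r := loopA graph goal ns' path w.1 (fun x hx => h x (List.mem_cons_of_mem _ hx))
        (r.1, ⟨r.2.1, fun x hx => r.2.2 x (w.2 x ((PySem.Set.mem_add v n x).2 (Or.inl hx)))⟩)
termination_by (pvMeas graph v, 0, ns.length)
decreasing_by
  · apply Prod.Lex.right'
    · exact Nat.le_refl _
    · apply Prod.Lex.right'
      · exact Nat.le_refl _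
      · simp
  · apply Prod.Lex.left
    exact pvMeas_add_lt graph (h n (List.mem_cons_self)) hn
  · apply Prod.Lex.left
    calc pvMeas graph w.1 ≤ pvMeas graph (PySem.Set.add v n) :=
          pvMeas_le_of_subset graph w.2
      _ < pvMeas graph v := pvMeas_add_lt graph (h n (List.mem_cons_self)) hn
end

def dfs (graph : List (String × List String)) (start : String) (goal : String) (path : Option (List String)) (visited : Option (List String)) : Option (List String) :=
  let p := match path with | none => [start] | some p => p
  let v : PySem.Set String := match visited with | none => PySem.Set.empty | some vs => PySem.Set.ofList vs
  (dfsA graph goal start p v).1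

-- ===== PORT B =====
-- port of Python B: the while-loop over the explicit stack of (remaining-neighbors, path) frames
def runStack (graph : List (String × List String)) (goal : String)
    (v : PySem.Set String) (stack : List (List String × List String))
    (h : ∀ f ∈ stack, ∀ x ∈ f.1, x ∈ pvU graph) : Option (List String) :=
  match stack with
  | [] => none
  | (rest, p) :: fs =>
    match rest with
    | [] => runStack graph goal v fs (fun f hf => h f (List.mem_cons_of_mem _ hf))
    | n :: rest' =>
      if hn : PySem.Set.contains v n then
        runStack graph goal v ((rest', p) :: fs)
          (by
            intro f hf
            rcases List.mem_cons.1 hf with hf | hf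
            · subst hf; intro x hx; exact h (n :: rest', p) (List.mem_cons_self) x (List.mem_cons_of_mem _ hx)
            · exact h f (List.mem_cons_of_mem _ hf))
      else
        let v' := PySem.Set.add v n
        if n = goal then some (p ++ [n])
        else
          runStack graph goal v' ((pvGet graph n, p ++ [n]) :: (rest', p) :: fs)
            (by
              intro f hf
              rcases List.mem_cons.1 hf with hf | hf
              · subst hf; exact pvGet_subset_pvU graph n
              · rcases List.mem_cons.1 hf with hf | hf
                · subst hf; intro x hx; exact h (n :: rest', p) (List.mem_cons_self) x (List.mem_cons_of_mem _ hx)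
                · exact h f (List.mem_cons_of_mem _ hf))
termination_by (pvMeas graph v, (stack.map (fun f => f.1.length)).sum + stack.length)
decreasing_by
  · apply Prod.Lex.right'
    · exact Nat.le_refl _
    · simp [List.map_cons]
  · apply Prod.Lex.right'
    · exact Nat.le_refl _
    · simp [List.map_cons]
  · apply Prod.Lex.left
    exact pvMeas_add_lt graph (h (n :: rest', p) (List.mem_cons_self) n (List.mem_cons_self)) hn

def dfs_alt (graph : List (String × List String)) (start : String) (goal : String) (path : Option (List String)) (visited : Option (List String)) : Option (List String) :=
  let p := match path with | none => [start] | some p => p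
  let v0 : PySem.Set String := match visited with | none => PySem.Set.empty | some vs => PySem.Set.ofList vs
  let v := PySem.Set.add v0 start
  if start = goal then some p
  else runStack graph goal v [(pvGet graph start, p)]
    (by intro f hf; rcases List.mem_cons.1 hf with hf | hf
        · subst hf; exact pvGet_subset_pvU graph start
        · simp at hf)

-- ===== PRECONDITION & SPEC =====
def Spec_dfs (graph : List (String × List String)) (start : String) (goal : String) (path : Option (List String)) (visited : Option (List String)) (out : Option (List String)) : Prop := out = dfs_alt graph start goal path visited
instance (graph : List (String × List String)) (start : String) (goal : String) (path : Option (List String)) (visited : Option (List String)) (out : Option (List String)) : Decidable (Spec_dfs graph start goal path visited out) := by unfold Spec_dfs; infer_instance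

-- ===== CLAIM (what is proved, stated in full; the proofs are below) =====
def Claim_equal_dfs : Prop := ∀ (graph : List (String × List String)) (start : String) (goal : String) (path : Option (List String)) (visited : Option (List String)), Dom_dfs graph start goal path visited → Spec_dfs graph start goal path visited (dfs graph start goal path visited)

-- ===== LEMMAS AND PROOFS =====

lemma sim (graph : List (String × List String)) (goal : String) :
    ∀ (k : Nat) (v : PySem.Set String), pvMeas graph v ≤ k →
    ∀ (ns : List String) (hns : ∀ x ∈ ns, x ∈ pvU graph)
      (p : List String) (fs : List (List String × List String))
      (hfs : ∀ f ∈ fs, ∀ x ∈ f.1, x ∈ pvU graph)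
      (H : ∀ f ∈ (ns, p) :: fs, ∀ x ∈ f.1, x ∈ pvU graph),
      runStack graph goal v ((ns, p) :: fs) H =
        (match (loopA graph goal ns p v hns).1 with
         | some r => some r
         | none => runStack graph goal (loopA graph goal ns p v hns).2.1 fs hfs) := by
  intro k
  induction k using Nat.strong_induction_on with
  | _ k IH =>
  intro v hv ns
  induction ns with
  | nil =>
    intro hns p fs hfs H
    rw [runStack, loopA]
  | cons n ns' ihns =>
    intro hns p fs hfs H
    by_cases hn : PySem.Set.contains v n = true
    · rw [runStack, loopA]
      simp only [hn, dif_pos]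
      exact ihns _ p fs hfs _
    · have hUn : n ∈ pvU graph := hns n List.mem_cons_self
      have hlt : pvMeas graph (PySem.Set.add v n) < pvMeas graph v :=
        pvMeas_add_lt graph hUn hn
      by_cases hg : n = goal
      · rw [runStack, loopA]
        simp only [hn, dif_neg, Bool.false_eq_true, not_false_iff]
        rw [dfsA]
        simp [hg]
      · rw [runStack, loopA]
        simp only [hn, dif_neg, Bool.false_eq_true, not_false_iff]
        rw [dfsA]
        simp only [hg, ite_false]
        have hfs2 : ∀ f ∈ (ns', p) :: fs, ∀ x ∈ f.1, x ∈ pvU graph := by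
          intro f hf
          rcases List.mem_cons.1 hf with hf | hf
          · subst hf; intro x hx; exact hns x (List.mem_cons_of_mem _ hx)
          · exact hfs f hf
        have hLHS := IH (pvMeas graph (PySem.Set.add v n)) (lt_of_lt_of_le hlt hv)
          (PySem.Set.add v n) le_rfl (pvGet graph n) (pvGet_subset_pvU graph n)
          (p ++ [n]) ((ns', p) :: fs) hfs2
          (by
            intro f hf
            rcases List.mem_cons.1 hf with hf | hf
            · subst hf; exact pvGet_subset_pvU graph n
            · exact hfs2 f hf)
        rw [hLHS]
        rcases hL : (loopA graph goal (pvGet graph n) (p ++ [n]) (PySem.Set.add v n)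
            (pvGet_subset_pvU graph n)).1 with _ | r
        · set w := (loopA graph goal (pvGet graph n) (p ++ [n]) (PySem.Set.add v n)
            (pvGet_subset_pvU graph n)).2 with hw
          have hsub : pvMeas graph w.1 ≤ pvMeas graph (PySem.Set.add v n) :=
            pvMeas_le_of_subset graph w.2
          have hLHS2 := IH (pvMeas graph w.1) (lt_of_lt_of_le (lt_of_le_of_lt hsub hlt) hv)
            w.1 le_rfl ns' (fun x hx => hns x (List.mem_cons_of_mem _ hx)) p fs hfs
            (by
              intro f hf
              rcases List.mem_cons.1 hf with hf | hf
              · subst hf; intro x hx; exact hns x (List.mem_cons_of_mem _ hx)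
              · exact hfs f hf)
          rw [hLHS2]
        · rfl
lemma topEq (graph : List (String × List String)) (goal start : String)
    (p : List String) (v : PySem.Set String)
    (pr : ∀ f ∈ [(pvGet graph start, p)], ∀ x ∈ f.1, x ∈ pvU graph) :
    (dfsA graph goal start p v).1 =
      if start = goal then some p
      else runStack graph goal (PySem.Set.add v start) [(pvGet graph start, p)] pr := by
  by_cases hg : start = goal
  · rw [dfsA]; simp [hg]
  · rw [dfsA]
    simp only [hg, ite_false]
    have h := sim graph goal (pvMeas graph (PySem.Set.add v start)) (PySem.Set.add v start) le_rfl
      (pvGet graph start) (pvGet_subset_pvU graph start) p []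
      (by intro f hf; simp at hf) pr
    rw [h]
    rcases h1 : (loopA graph goal (pvGet graph start) p (PySem.Set.add v start)
        (pvGet_subset_pvU graph start)).1 with _ | r
    · rw [runStack]
    · rfl


-- ===== VERDICT (by name: the statement is the Claim_ definition above) =====
theorem dfs_spec : Claim_equal_dfs := by
  intro graph start goal path visited _
  unfold Spec_dfs dfs dfs_alt
  exact topEq graph goal start _ _ _
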